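-- pv_equiv track=rewrite | github.com/WadhwaniAI/StudentDropoutEWS | src/feature_engineering.py | formulate_attendance_features
-- ===== SOURCE A (Python) =====
-- import itertools
--
-- def formulate_attendance_features(combinations_of_characters: list):
--
--      '''
--      Description:
--           Generates all possible combinations, for given characters, and corresponding maximum lengths.
--           For example, given the characters ["p", "a"] and maximum length 4, all combinations of characters of length 1 to 4 would be generated.
--           These would include ['p', 'pa', 'papa', ..., ].
--      Args:
--           combinations_of_characters: A list of tuples. Each tuple contains a maximum length and a list of characters.
--      Returns:
--           List of all possible combinations of characters.
--      '''
--
--      # placeholder list to cache new features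
--      new_features = []
--
--      # loop over all combinations of characters
--      for max_length, characters in combinations_of_characters:
--           for combination_length in range(1, int(max_length)+1):
--                combinations = itertools.product(characters, repeat=combination_length)
--                for combination in combinations:
--                     new_features.append(''.join(combination))
--
--      # sort and return new features
--      new_features = list(set(new_features))
--      new_features.sort()
--
--      return new_features
-- ===== SOURCE B (Python) =====
-- def formulate_attendance_features(combinations_of_characters: list):
--     # Level-reuse rewrite: each length-k level is built from the length-(k-1) level
--     # instead of recomputing a full itertools.product per length.
--     new_features = []
--     for max_length, characters in combinations_of_characters:
--         level = ['']
--         for _ in range(int(max_length)):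
--             level = [s + c for s in level for c in characters]
--             new_features.extend(level)
--     new_features = list(set(new_features))
--     new_features.sort()
--     return new_features
-- ===== Notes on version B (the rewrite author's own statement) =====
-- stated objective: alternative
-- what changed: Replaces the independent itertools.product enumeration per combination length by iteratively extending the previous level of strings (level = [s + c ...]), reusing each length-(k-1) level to build length k, before the same set-dedup and sort.
import Mathlib
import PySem

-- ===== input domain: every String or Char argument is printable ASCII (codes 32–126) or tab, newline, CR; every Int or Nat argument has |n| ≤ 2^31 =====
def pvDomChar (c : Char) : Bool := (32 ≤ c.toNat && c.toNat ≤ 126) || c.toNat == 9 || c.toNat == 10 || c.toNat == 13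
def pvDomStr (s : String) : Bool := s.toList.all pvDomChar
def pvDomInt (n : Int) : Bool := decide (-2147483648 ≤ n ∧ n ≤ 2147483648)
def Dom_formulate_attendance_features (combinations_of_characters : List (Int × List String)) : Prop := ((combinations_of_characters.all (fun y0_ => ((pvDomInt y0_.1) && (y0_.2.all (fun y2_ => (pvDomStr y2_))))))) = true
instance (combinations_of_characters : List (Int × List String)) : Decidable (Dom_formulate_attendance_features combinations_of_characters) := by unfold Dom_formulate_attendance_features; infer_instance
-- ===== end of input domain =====

-- B replaces the independent per-length itertools.product enumeration by iteratively
-- extending the previous level of strings (a running table); same sorted-deduplicated result.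

-- ===== PORT A =====
-- itertools.product(characters, repeat=k): first factor varies slowest
def pvProd (characters : List String) : Nat → List (List String)
  | 0 => [[]]
  | k + 1 => characters.flatMap (fun c => (pvProd characters k).map (fun t => c :: t))

def formulate_attendance_features (combinations_of_characters : List (Int × List String)) : List String :=
  let new_features : List String :=
    combinations_of_characters.foldl (fun acc p =>
      (PySem.List.pyRange 1 (p.1 + 1) 1).foldl (fun acc2 combination_length =>
        acc2 ++ (pvProd p.2 combination_length.toNat).map (fun combination =>
          PySem.Str.join "" combination)) acc) []
  PySem.List.sorted (PySem.Set.ofList new_features) (fun x => x) false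

-- ===== PORT B =====
-- one iteration of B's inner loop: level = [s + c for s in level for c in characters]
def pvStep (characters : List String) (level : List String) : List String :=
  level.flatMap (fun s => characters.map (fun c => s ++ c))

-- B's inner loop: run pvStep n times, collecting every produced level
def pvLevels (characters : List String) : Nat → List String → List String
  | 0, _ => []
  | n + 1, level =>
      let level' := pvStep characters level
      level' ++ pvLevels characters n level'

def formulate_attendance_features_alt (combinations_of_characters : List (Int × List String)) : List String :=
  let new_features : List String :=
    combinations_of_characters.foldl (fun acc p => acc ++ pvLevels p.2 p.1.toNat [""]) []
  PySem.List.sorted (PySem.Set.ofList new_features) (fun x => x) false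

-- ===== PRECONDITION & SPEC =====
def Spec_formulate_attendance_features (combinations_of_characters : List (Int × List String)) (out : List String) : Prop := out = formulate_attendance_features_alt combinations_of_characters
instance (combinations_of_characters : List (Int × List String)) (out : List String) : Decidable (Spec_formulate_attendance_features combinations_of_characters out) := by unfold Spec_formulate_attendance_features; infer_instance

-- ===== CLAIM (what is proved, stated in full; the proofs are below) =====
def Claim_equal_formulate_attendance_features : Prop := ∀ (combinations_of_characters : List (Int × List String)), Dom_formulate_attendance_features combinations_of_characters → Spec_formulate_attendance_features combinations_of_characters (formulate_attendance_features combinations_of_characters)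

-- ===== LEMMAS AND PROOFS =====

-- "".join basics
theorem chars_join_nil_cons (x : List Char) (L : List (List Char)) :
    PySem.Chars.join [] (x :: L) = x ++ PySem.Chars.join [] L := by
  cases L <;> simp [PySem.Chars.join, List.intercalate]

theorem str_join_empty_cons (c : String) (t : List String) :
    PySem.Str.join "" (c :: t) = c ++ PySem.Str.join "" t := by
  simp only [PySem.Str.join, String.toList_empty, List.map_cons, chars_join_nil_cons]
  simp [String.ofList_append]

theorem str_join_empty_nil : PySem.Str.join "" ([] : List String) = "" := by decide

theorem str_join_empty_append (t u : List String) :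
    PySem.Str.join "" (t ++ u) = PySem.Str.join "" t ++ PySem.Str.join "" u := by
  induction t with
  | nil => simp [str_join_empty_nil]
  | cons c t ih => simp [str_join_empty_cons, ih, String.append_assoc]

-- "x is the concatenation of k strings drawn from chars"
def pvIsComb (chars : List String) (k : Nat) (x : String) : Prop :=
  ∃ l : List String, l.length = k ∧ (∀ y ∈ l, y ∈ chars) ∧ x = PySem.Str.join "" l

-- A's per-length enumeration hits exactly the length-k combinations
theorem mem_prod_join (chars : List String) (k : Nat) (x : String) :
    x ∈ (pvProd chars k).map (fun t => PySem.Str.join "" t) ↔ pvIsComb chars k x := by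
  induction k generalizing x with
  | zero =>
      simp only [pvProd, List.map_cons, List.map_nil, List.mem_singleton, pvIsComb]
      constructor
      · rintro rfl; exact ⟨[], rfl, by simp, (str_join_empty_nil).symm⟩
      · rintro ⟨l, hl, -, rfl⟩
        rw [List.length_eq_zero_iff] at hl; subst hl; exact str_join_empty_nil
  | succ k ih =>
      constructor
      · intro hx
        simp only [pvProd, List.map_flatMap, List.mem_flatMap, List.map_map, List.mem_map] at hx
        obtain ⟨c, hc, t, ht, rfl⟩ := hx
        obtain ⟨l, hl, hmem, hx⟩ := (ih _).1 (List.mem_map_of_mem ht)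
        refine ⟨c :: l, by simp [hl], ?_, ?_⟩
        · intro y hy; rcases List.mem_cons.1 hy with rfl | hy
          · exact hc
          · exact hmem y hy
        · simp only [Function.comp, str_join_empty_cons, hx]
      · rintro ⟨l, hl, hmem, rfl⟩
        cases l with
        | nil => simp at hl
        | cons c t =>
            have ht : PySem.Str.join "" t ∈ (pvProd chars k).map (fun t => PySem.Str.join "" t) :=
              (ih _).2 ⟨t, by simpa using hl, fun y hy => hmem y (List.mem_cons_of_mem _ hy), rfl⟩
            obtain ⟨t', ht', hj⟩ := List.mem_map.1 ht
            simp only [pvProd, List.map_flatMap, List.mem_flatMap, List.map_map, List.mem_map]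
            exact ⟨c, hmem c List.mem_cons_self, t', ht',
              by simp only [Function.comp, str_join_empty_cons, hj]⟩

-- B's k-fold level extension hits exactly the length-k combinations
theorem mem_iter_step (chars : List String) (k : Nat) (x : String) :
    x ∈ (pvStep chars)^[k] [""] ↔ pvIsComb chars k x := by
  induction k generalizing x with
  | zero =>
      simp only [Function.iterate_zero, id, List.mem_singleton, pvIsComb]
      constructor
      · rintro rfl; exact ⟨[], rfl, by simp, (str_join_empty_nil).symm⟩
      · rintro ⟨l, hl, -, rfl⟩
        rw [List.length_eq_zero_iff] at hl; subst hl; exact str_join_empty_nil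
  | succ k ih =>
      rw [Function.iterate_succ_apply']
      simp only [pvStep, List.mem_flatMap, List.mem_map]
      constructor
      · rintro ⟨s, hs, c, hc, rfl⟩
        obtain ⟨l, hl, hmem, rfl⟩ := (ih s).1 hs
        refine ⟨l ++ [c], by simp [hl], ?_, ?_⟩
        · intro y hy; rcases List.mem_append.1 hy with hy | hy
          · exact hmem y hy
          · simp only [List.mem_singleton] at hy; exact hy ▸ hc
        · simp [str_join_empty_append, str_join_empty_cons, str_join_empty_nil]
      · rintro ⟨l, hl, hmem, rfl⟩
        rcases List.eq_nil_or_concat l with rfl | ⟨t, c, rfl⟩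
        · simp at hl
        · rw [List.concat_eq_append] at hl hmem ⊢
          refine ⟨PySem.Str.join "" t, (ih _).2 ⟨t, by simpa using hl,
            fun y hy => hmem y (List.mem_append_left _ hy), rfl⟩,
            c, hmem c (List.mem_append_right _ List.mem_cons_self), ?_⟩
          simp [str_join_empty_append, str_join_empty_cons, str_join_empty_nil]

-- B's inner loop collects the levels step^1, ..., step^n
theorem pvLevels_eq_flatMap (chars : List String) (n : Nat) (l : List String) :
    pvLevels chars n l = (List.range n).flatMap (fun i => (pvStep chars)^[i + 1] l) := by
  induction n generalizing l with
  | zero => simp [pvLevels]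
  | succ n ih =>
      rw [List.range_succ_eq_map]
      simp only [pvLevels, ih, List.flatMap_cons, List.flatMap_map, Function.iterate_succ_apply,
        Function.iterate_zero, id]

-- per-tuple membership equality
theorem per_tuple_mem (m : Int) (chars : List String) (x : String) :
    x ∈ (PySem.List.pyRange 1 (m + 1) 1).flatMap
        (fun k => (pvProd chars k.toNat).map (fun t => PySem.Str.join "" t)) ↔
    x ∈ pvLevels chars m.toNat [""] := by
  rw [pvLevels_eq_flatMap]
  simp only [List.mem_flatMap, PySem.List.mem_pyRange_one, List.mem_range]
  constructor
  · rintro ⟨k, ⟨h1, h2⟩, hx⟩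
    refine ⟨k.toNat - 1, by omega, ?_⟩
    have : k.toNat - 1 + 1 = k.toNat := by omega
    rw [this, mem_iter_step]
    exact (mem_prod_join _ _ _).1 hx
  · rintro ⟨i, hi, hx⟩
    refine ⟨(i : Int) + 1, by omega, ?_⟩
    have : ((i : Int) + 1).toNat = i + 1 := by omega
    rw [this, mem_prod_join]
    exact (mem_iter_step _ _ _).1 hx

-- the two accumulated feature lists have the same members
theorem features_mem (combos : List (Int × List String)) (x : String) :
    (x ∈ combos.foldl (fun acc p =>
        (PySem.List.pyRange 1 (p.1 + 1) 1).foldl (fun acc2 combination_length =>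
          acc2 ++ (pvProd p.2 combination_length.toNat).map (fun combination =>
            PySem.Str.join "" combination)) acc) []) ↔
    (x ∈ combos.foldl (fun acc p => acc ++ pvLevels p.2 p.1.toNat [""]) []) := by
  have hA : (fun (acc : List String) (p : Int × List String) =>
      (PySem.List.pyRange 1 (p.1 + 1) 1).foldl (fun acc2 combination_length =>
        acc2 ++ (pvProd p.2 combination_length.toNat).map (fun combination =>
          PySem.Str.join "" combination)) acc)
      = (fun acc p => acc ++ (PySem.List.pyRange 1 (p.1 + 1) 1).flatMap
          (fun k => (pvProd p.2 k.toNat).map (fun t => PySem.Str.join "" t))) := by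
    funext acc p
    exact PySem.List.foldl_append_eq_flatMap _ _ _
  rw [hA, PySem.List.foldl_append_eq_flatMap, PySem.List.foldl_append_eq_flatMap,
    List.nil_append, List.nil_append, List.mem_flatMap, List.mem_flatMap]
  exact exists_congr fun p => and_congr_right fun _ => per_tuple_mem p.1 p.2 x

-- ===== VERDICT (by name: the statement is the Claim_ definition above) =====
theorem formulate_attendance_features_spec : Claim_equal_formulate_attendance_features := by
  intro combos _
  show formulate_attendance_features combos = formulate_attendance_features_alt combos
  unfold formulate_attendance_features formulate_attendance_features_alt
  apply PySem.List.sorted_eq_sorted_of_perm _ _ _ (fun a b h => h)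
  apply (List.perm_ext_iff_of_nodup (PySem.Set.nodup_ofList _) (PySem.Set.nodup_ofList _)).2
  intro x
  simp only [PySem.Set.mem_ofList]
  exact features_mem combos x
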